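-- pv_equiv track=rewrite | github.com/Curly-Mo/codejam | 2013/falling-diamonds/falling-diamonds.py | numOperationsNeeded
-- ===== SOURCE A (Python) =====
-- def numOperationsNeeded(armin, enemies):
-- 	katamariSize = armin
-- 	remaining = len(enemies) + 1
-- 	operations = 0;
-- 	for enemy in enemies:
-- 		remaining -= 1
-- 		if katamariSize > enemy:
-- 			katamariSize += enemy
-- 		else:
-- 			ops = 0
-- 			while katamariSize <= enemy:
-- 				ops += 1
-- 				if katamariSize - 1 > 0:
-- 					katamariSize += katamariSize - 1
-- 				else:
-- 					break
-- 			if ops >= remaining: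
-- 				operations += remaining
-- 				return operations
-- 			else:
-- 				operations += ops
-- 				if katamariSize > enemy:
-- 					katamariSize += enemy
--
--
-- 	return operations
-- ===== SOURCE B (Python) =====
-- def numOperationsNeeded(armin, enemies):
--     size = armin
--     remaining = len(enemies) + 1
--     operations = 0
--     for enemy in enemies:
--         remaining -= 1
--         if size > enemy:
--             size += enemy
--         else:
--             if size <= 1:
--                 ops = 1
--             else:
--                 # smallest k >= 1 with 1 + 2**k * (size - 1) > enemy, by bit length
--                 q = (enemy - 1) // (size - 1)
--                 ops = max(1, q.bit_length())
--                 size = 1 + (size - 1) * 2 ** ops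
--             if ops >= remaining:
--                 return operations + remaining
--             operations += ops
--             if size > enemy:
--                 size += enemy
--     return operations
-- ===== Notes on version B (the rewrite author's own statement) =====
-- stated objective: alternative
-- what changed: A's inner while-loop that repeatedly doubles the katamari (size -> 2*size-1) is replaced by a closed-form computation: the operation count is obtained from the bit length of (enemy-1)//(size-1) and the new size is written directly as 1 + (size-1)*2^ops; the outer enemy loop and its early-return bookkeeping are unchanged.
import Mathlib
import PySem

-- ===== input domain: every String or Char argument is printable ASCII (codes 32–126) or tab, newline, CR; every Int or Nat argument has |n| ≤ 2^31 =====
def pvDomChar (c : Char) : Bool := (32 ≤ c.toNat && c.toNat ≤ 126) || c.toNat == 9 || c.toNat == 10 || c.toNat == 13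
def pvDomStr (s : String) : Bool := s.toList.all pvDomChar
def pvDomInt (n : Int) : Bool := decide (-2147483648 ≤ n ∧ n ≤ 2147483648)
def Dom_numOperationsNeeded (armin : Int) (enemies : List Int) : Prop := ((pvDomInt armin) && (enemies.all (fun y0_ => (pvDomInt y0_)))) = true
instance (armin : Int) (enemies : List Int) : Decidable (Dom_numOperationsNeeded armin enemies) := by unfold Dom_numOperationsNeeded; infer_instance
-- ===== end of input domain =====

-- B replaces A's doubling while-loop with a closed-form bit-length computation of
-- the operation count (objective: alternative decomposition; same outer loop).

-- ===== PORT A =====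
-- A's inner while loop: returns (ops, new katamariSize)
def pvGrowA (enemy size : Int) : Int × Int :=
  if size ≤ enemy then
    if size - 1 > 0 then
      let r := pvGrowA enemy (size + (size - 1))
      (r.1 + 1, r.2)
    else (1, size)  -- one pass of the loop body, then break
  else (0, size)
termination_by (enemy + 1 - size).toNat
decreasing_by omega

-- A's for-loop with early return, as structural recursion over enemies
def pvLoopA (enemies : List Int) (katamariSize remaining operations : Int) : Int :=
  match enemies with
  | [] => operations
  | enemy :: rest =>
    let remaining := remaining - 1
    if katamariSize > enemy then
      pvLoopA rest (katamariSize + enemy) remaining operations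
    else
      let r := pvGrowA enemy katamariSize
      let ops := r.1
      let katamariSize := r.2
      if ops ≥ remaining then operations + remaining
      else
        let operations := operations + ops
        if katamariSize > enemy then
          pvLoopA rest (katamariSize + enemy) remaining operations
        else
          pvLoopA rest katamariSize remaining operations

def numOperationsNeeded (armin : Int) (enemies : List Int) : Int :=
  pvLoopA enemies armin ((enemies.length : Int) + 1) 0

-- ===== PORT B =====
def pvLoopB (enemies : List Int) (size remaining operations : Int) : Int :=
  match enemies with
  | [] => operations
  | enemy :: rest =>
    let remaining := remaining - 1
    if size > enemy then
      pvLoopB rest (size + enemy) remaining operations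
    else
      let p : Int × Int :=
        if size ≤ 1 then (1, size)
        else
          -- smallest k >= 1 with 1 + 2^k * (size - 1) > enemy, by bit length
          let q := PySem.Int.floordiv (enemy - 1) (size - 1)
          let ops : Int := max 1 ((PySem.Int.bitLength q : Nat) : Int)
          (ops, 1 + (size - 1) * 2 ^ ops.toNat)
      let ops := p.1
      let size := p.2
      if ops ≥ remaining then operations + remaining
      else
        let operations := operations + ops
        if size > enemy then
          pvLoopB rest (size + enemy) remaining operations
        else
          pvLoopB rest size remaining operations

def numOperationsNeeded_alt (armin : Int) (enemies : List Int) : Int :=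
  pvLoopB enemies armin ((enemies.length : Int) + 1) 0

-- ===== PRECONDITION & SPEC =====
def Spec_numOperationsNeeded (armin : Int) (enemies : List Int) (out : Int) : Prop := out = numOperationsNeeded_alt armin enemies
instance (armin : Int) (enemies : List Int) (out : Int) : Decidable (Spec_numOperationsNeeded armin enemies out) := by unfold Spec_numOperationsNeeded; infer_instance

-- ===== CLAIM (what is proved, stated in full; the proofs are below) =====
def Claim_equal_numOperationsNeeded : Prop := ∀ (armin : Int) (enemies : List Int), Dom_numOperationsNeeded armin enemies → Spec_numOperationsNeeded armin enemies (numOperationsNeeded armin enemies)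

-- ===== LEMMAS AND PROOFS =====

-- the closed form of A's while loop, for size ≥ 2 and size ≤ enemy
theorem pvGrowA_closed (enemy size : Int) (h2 : 2 ≤ size) (hle : size ≤ enemy) :
    pvGrowA enemy size =
      (((PySem.Int.bitLength (PySem.Int.floordiv (enemy - 1) (size - 1)) : Nat) : Int),
       1 + (size - 1) * 2 ^ PySem.Int.bitLength (PySem.Int.floordiv (enemy - 1) (size - 1))) := by
  rw [pvGrowA, if_pos hle, if_pos (by omega : size - 1 > 0)]
  by_cases hbig : enemy < size + (size - 1)
  · have hstop : pvGrowA enemy (size + (size - 1)) = (0, size + (size - 1)) := by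
      rw [pvGrowA, if_neg (by omega)]
    have hq : PySem.Int.floordiv (enemy - 1) (size - 1) = 1 := by
      rw [PySem.Int.floordiv_eq_iff_of_pos (by omega)]
      constructor <;> nlinarith
    rw [hstop, hq]
    have hb1 : PySem.Int.bitLength 1 = 1 := by decide
    rw [hb1]
    dsimp only
    rw [Prod.mk.injEq]
    exact ⟨by norm_num, by ring⟩
  · have ih := pvGrowA_closed enemy (size + (size - 1)) (by omega) (by omega)
    rw [ih]
    have hden : size + (size - 1) - 1 = 2 * (size - 1) := by ring
    rw [hden]
    set q := PySem.Int.floordiv (enemy - 1) (size - 1) with hqdef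
    set q' := PySem.Int.floordiv (enemy - 1) (2 * (size - 1)) with hq'def
    -- q ≥ 2 since enemy - 1 ≥ 2 * (size - 1)
    have hq2 : 2 ≤ q := by
      rw [hqdef, PySem.Int.le_floordiv_iff_mul_le (by omega)]; omega
    -- bracket facts from the two floor divisions
    have hbq : q * (size - 1) ≤ enemy - 1 ∧ enemy - 1 < (q + 1) * (size - 1) := by
      rw [← PySem.Int.floordiv_eq_iff_of_pos (by omega : (0:Int) < size - 1)]
    have hbq' : q' * (2 * (size - 1)) ≤ enemy - 1 ∧ enemy - 1 < (q' + 1) * (2 * (size - 1)) := by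
      rw [← PySem.Int.floordiv_eq_iff_of_pos (by omega : (0:Int) < 2 * (size - 1))]
    -- q' = q // 2, hence bitLength q = bitLength q' + 1
    have hhalf : PySem.Int.floordiv q 2 = q' := by
      rw [PySem.Int.floordiv_eq_iff_of_pos (by omega : (0:Int) < 2)]
      constructor <;> nlinarith [hbq.1, hbq.2, hbq'.1, hbq'.2, h2]
    have hbl : PySem.Int.bitLength q = PySem.Int.bitLength q' + 1 := by
      rw [PySem.Int.bitLength_of_pos (by omega : 0 < q), hhalf]
    rw [hbl]
    dsimp only
    rw [Prod.mk.injEq]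
    exact ⟨by push_cast; ring, by rw [pow_succ]; ring⟩
termination_by (enemy + 1 - size).toNat
decreasing_by omega

theorem pvLoop_eq (enemies : List Int) (size remaining operations : Int) :
    pvLoopA enemies size remaining operations = pvLoopB enemies size remaining operations := by
  induction enemies generalizing size remaining operations with
  | nil => rfl
  | cons enemy rest ih =>
    rw [pvLoopA, pvLoopB]
    by_cases hgt : size > enemy
    · simp only [hgt, if_pos, ih]
    · simp only [hgt, if_false]
      by_cases hs1 : size ≤ 1
      · -- A's loop runs once and breaks: pvGrowA = (1, size)
        have hg : pvGrowA enemy size = (1, size) := by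
          rw [pvGrowA]; simp only [if_pos (by omega : size ≤ enemy)]
          simp only [if_neg (by omega : ¬ size - 1 > 0)]
        simp only [hg, if_pos hs1]
        split_ifs <;> simp [ih]
      · have h2 : 2 ≤ size := by omega
        have hle : size ≤ enemy := by omega
        have hbl : 1 ≤ PySem.Int.bitLength (PySem.Int.floordiv (enemy - 1) (size - 1)) := by
          have hq1 : 1 ≤ PySem.Int.floordiv (enemy - 1) (size - 1) := by
            rw [PySem.Int.le_floordiv_iff_mul_le (by omega)]; omega
          by_contra hc
          have h0 : PySem.Int.bitLength (PySem.Int.floordiv (enemy - 1) (size - 1)) = 0 := by omega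
          have := PySem.Int.lt_two_pow_bitLength (PySem.Int.floordiv (enemy - 1) (size - 1))
          rw [h0] at this
          omega
        have hmax : max (1:Int) ((PySem.Int.bitLength (PySem.Int.floordiv (enemy - 1) (size - 1)) : Nat) : Int)
            = ((PySem.Int.bitLength (PySem.Int.floordiv (enemy - 1) (size - 1)) : Nat) : Int) := by
          omega
        have htn : (((PySem.Int.bitLength (PySem.Int.floordiv (enemy - 1) (size - 1)) : Nat) : Int)).toNat
            = PySem.Int.bitLength (PySem.Int.floordiv (enemy - 1) (size - 1)) := by
          omega
        simp only [pvGrowA_closed enemy size h2 hle, if_neg hs1, hmax, htn]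
        split_ifs <;> simp [ih]

-- ===== VERDICT (by name: the statement is the Claim_ definition above) =====
theorem numOperationsNeeded_spec : Claim_equal_numOperationsNeeded := by
  intro armin enemies _
  unfold Spec_numOperationsNeeded numOperationsNeeded numOperationsNeeded_alt
  exact pvLoop_eq enemies armin _ 0
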